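-- pv_equiv track=rewrite | github.com/Tulpana/ARC-AGI-2 | arc_agi_2_submission/ril/solver.py | tight_crop_uncrop
-- ===== SOURCE A (Python) =====
-- from typing import Iterable, List, Dict, Tuple, Any, Optional, Sequence, Set, Mapping
-- from collections import Counter, deque
--
-- Grid = List[List[int]]
--
-- def grid_shape(g: Grid) -> Tuple[int, int]:
--     return (len(g), len(g[0]) if g else 0)
--
-- def in_bounds(r: int, c: int, h: int, w: int) -> bool:
--     return 0 <= r < h and 0 <= c < w
--
-- def copy_grid(g: Grid) -> Grid:
--     return [row[:] for row in g]
--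
-- def mode_color(g: Grid) -> int:
--     cnt = Counter(cell for row in g for cell in row)
--     return cnt.most_common(1)[0][0] if cnt else 0
--
-- def connected_components(g: Grid, bg: Optional[int] = None) -> List[List[Tuple[int,int]]]:
--     """4-neighborhood components of non-bg cells."""
--     if not g or not g[0]: return []
--     H, W = len(g), len(g[0])
--     seen = [[False]*W for _ in range(H)]
--     comps = []
--     for r in range(H):
--         for c in range(W):
--             if seen[r][c]: continue
--             val = g[r][c]
--             if bg is not None and val == bg:
--                 seen[r][c] = True
--                 continue
--             if bg is None and val == 0:  # default: treat 0 as bg if not specified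
--                 seen[r][c] = True
--                 continue
--             # BFS
--             if (bg is None and val != 0) or (bg is not None and val != bg):
--                 q = deque([(r,c)])
--                 seen[r][c] = True
--                 comp = []
--                 while q:
--                     rr, cc = q.popleft()
--                     comp.append((rr,cc))
--                     for dr, dc in ((1,0),(-1,0),(0,1),(0,-1)):
--                         nr, nc = rr+dr, cc+dc
--                         if in_bounds(nr,nc,H,W) and not seen[nr][nc]:
--                             if (bg is None and g[nr][nc] != 0) or (bg is not None and g[nr][nc] != bg):
--                                 seen[nr][nc] = True
--                                 q.append((nr,nc))
--                             else:
--                                 seen[nr][nc] = True  # mark bg as seen so we don't revisit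
--                 comps.append(comp)
--             else:
--                 seen[r][c] = True
--     return comps
--
-- def crop_to_bbox(g: Grid, cells: List[Tuple[int,int]]) -> Grid:
--     if not cells: return [[]]
--     rs = [r for r,_ in cells]
--     cs = [c for _,c in cells]
--     r0, r1 = min(rs), max(rs)
--     c0, c1 = min(cs), max(cs)
--     return [row[c0:c1+1] for row in g[r0:r1+1]]
--
-- def tight_crop_uncrop(grid: Grid, target_shape: Tuple[int, int]) -> Grid:
--     if not grid or not grid[0] or not target_shape:
--         return copy_grid(grid)
--     th, tw = target_shape
--     if th <= 0 or tw <= 0: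
--         return copy_grid(grid)
--     bg = mode_color(grid)
--     comps = connected_components(grid, bg=bg)
--     if not comps:
--         return copy_grid(grid)
--     all_cells = [cell for comp in comps for cell in comp]
--     cropped = crop_to_bbox(grid, all_cells)
--     ch, cw = grid_shape(cropped)
--     if ch == th and cw == tw:
--         return cropped
--     canvas = [[bg for _ in range(tw)] for _ in range(th)]
--     top = max(0, (th - ch) // 2)
--     left = max(0, (tw - cw) // 2)
--     for r in range(min(ch, th)):
--         for c in range(min(cw, tw)):
--             canvas[top + r][left + c] = cropped[r][c]
--     return canvas
-- ===== SOURCE B (Python) =====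
-- def tight_crop_uncrop(grid, target_shape):
--     if not grid or not grid[0] or not target_shape:
--         return [row[:] for row in grid]
--     th, tw = target_shape
--     if th <= 0 or tw <= 0:
--         return [row[:] for row in grid]
--     counts = {}
--     for row in grid:
--         for v in row:
--             counts[v] = counts.get(v, 0) + 1
--     bg = max(counts.items(), key=lambda kv: kv[1])[0]
--     H, W = len(grid), len(grid[0])
--     r0 = r1 = c0 = c1 = None
--     for r in range(H):
--         row = grid[r]
--         for c in range(W):
--             if row[c] != bg:
--                 if r0 is None:
--                     r0, r1, c0, c1 = r, r, c, c
--                 else: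
--                     r0 = min(r0, r); r1 = max(r1, r)
--                     c0 = min(c0, c); c1 = max(c1, c)
--     if r0 is None:
--         return [row[:] for row in grid]
--     cropped = [row[c0:c1 + 1] for row in grid[r0:r1 + 1]]
--     ch, cw = len(cropped), len(cropped[0])
--     if ch == th and cw == tw:
--         return cropped
--     canvas = [[bg for _ in range(tw)] for _ in range(th)]
--     top = max(0, (th - ch) // 2)
--     left = max(0, (tw - cw) // 2)
--     for r in range(min(ch, th)):
--         for c in range(min(cw, tw)):
--             canvas[top + r][left + c] = cropped[r][c]
--     return canvas
-- ===== Notes on version B (the rewrite author's own statement) =====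
-- stated objective: simpler
-- what changed: B drops the BFS connected-components pass entirely: since only the bounding box of all non-background cells is used, B finds it with one min/max scan over the grid (and counts colors with a plain dict loop instead of Counter.most_common).
import Mathlib
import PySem

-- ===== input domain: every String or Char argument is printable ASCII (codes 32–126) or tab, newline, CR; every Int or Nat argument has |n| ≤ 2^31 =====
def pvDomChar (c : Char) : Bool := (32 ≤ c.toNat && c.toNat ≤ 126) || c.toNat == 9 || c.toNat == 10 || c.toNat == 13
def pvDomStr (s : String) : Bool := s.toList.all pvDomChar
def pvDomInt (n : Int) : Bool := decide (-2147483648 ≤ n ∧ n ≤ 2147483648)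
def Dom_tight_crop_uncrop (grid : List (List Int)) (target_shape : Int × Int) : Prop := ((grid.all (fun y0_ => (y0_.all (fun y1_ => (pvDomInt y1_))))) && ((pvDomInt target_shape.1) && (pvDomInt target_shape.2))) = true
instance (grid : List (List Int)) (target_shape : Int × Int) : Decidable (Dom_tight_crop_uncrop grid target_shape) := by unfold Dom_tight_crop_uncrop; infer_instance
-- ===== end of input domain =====

-- B replaces A's Counter/BFS connected-components machinery by a single min/max bounding-box
-- scan (everything else — guards, mode colour, crop, centering — computes the same values).
-- Both Pythons raise IndexError on ragged grids whose later row is shorter than the first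
-- (when the main branch runs); Pre_ excludes exactly those raising inputs.

-- ===== PORT A =====
-- g[r][c]; exact whenever the Python access is in range (guaranteed under Pre_)
def pvAt (g : List (List Int)) (p : Int × Int) : Int :=
  (PySem.List.pyGet? ((PySem.List.pyGet? g p.1).getD []) p.2).getD 0

def pvInb (H W : Int) (p : Int × Int) : Bool :=
  decide (0 ≤ p.1 ∧ p.1 < H ∧ 0 ≤ p.2 ∧ p.2 < W)

-- the row-major 'for r in range(H): for c in range(W)' index list
def pvAllCells (H W : Int) : List (Int × Int) :=
  (PySem.List.pyRange 0 H 1).flatMap (fun r => (PySem.List.pyRange 0 W 1).map (fun c => (r, c)))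

def pvDirs : List (Int × Int) := [(1,0),(-1,0),(0,1),(0,-1)]

-- one neighbour visit of A's BFS: mark seen; enqueue iff non-background
def pvMark (g : List (List Int)) (H W bg : Int)
    (st : List (Int × Int) × List (Int × Int)) (p : Int × Int) :
    List (Int × Int) × List (Int × Int) :=
  if pvInb H W p = true ∧ p ∉ st.1 then
    if pvAt g p ≠ bg then (p :: st.1, st.2 ++ [p]) else (p :: st.1, st.2)
  else st

-- number of grid cells not yet marked seen (termination measure only)
def pvUnseen (H W : Int) (seen : List (Int × Int)) : Nat :=
  ((pvAllCells H W).filter (fun c => decide (c ∉ seen))).length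

theorem pvUnseen_strict (H W : Int) {s : List (Int × Int)} {p : Int × Int}
    (hinb : pvInb H W p = true) (hns : p ∉ s) :
    pvUnseen H W (p :: s) < pvUnseen H W s := by
  unfold pvUnseen
  have hmem : p ∈ pvAllCells H W := by
    unfold pvAllCells pvInb at *
    simp only [decide_eq_true_eq] at hinb
    simp only [List.mem_flatMap, List.mem_map, PySem.List.mem_pyRange_one]
    exact ⟨p.1, ⟨hinb.1, hinb.2.1⟩, p.2, ⟨hinb.2.2.1, hinb.2.2.2⟩, rfl⟩
  have heq : (pvAllCells H W).filter (fun c => decide (c ∉ p :: s))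
      = ((pvAllCells H W).filter (fun c => decide (c ∉ s))).filter (fun c => decide (c ≠ p)) := by
    rw [List.filter_filter]
    apply List.filter_congr
    intro x _
    simp only [List.mem_cons, decide_not]
    by_cases h1 : x = p <;> by_cases h2 : x ∈ s <;> simp [h1, h2]
  rw [heq]
  have hpmem : p ∈ (pvAllCells H W).filter (fun c => decide (c ∉ s)) := by
    simp [List.mem_filter, hmem, hns]
  calc (((pvAllCells H W).filter (fun c => decide (c ∉ s))).filter (fun c => decide (c ≠ p))).length
      < ((pvAllCells H W).filter (fun c => decide (c ∉ s))).length := by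
        rw [List.length_filter_lt_length_iff_exists]
        exact ⟨p, hpmem, by simp⟩
    _ ≤ _ := le_refl _

theorem pvMarkFold_measure (g : List (List Int)) (H W bg : Int) (ds : List (Int × Int))
    (seen q : List (Int × Int)) :
    (∀ x ∈ seen, x ∈ (ds.foldl (pvMark g H W bg) (seen, q)).1) ∧
    pvUnseen H W (ds.foldl (pvMark g H W bg) (seen, q)).1 ≤ pvUnseen H W seen ∧
    ((ds.foldl (pvMark g H W bg) (seen, q)) = (seen, q) ∨
      pvUnseen H W (ds.foldl (pvMark g H W bg) (seen, q)).1 < pvUnseen H W seen) := by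
  induction ds generalizing seen q with
  | nil => exact ⟨fun x h => h, le_refl _, Or.inl rfl⟩
  | cons d ds ih =>
    simp only [List.foldl_cons]
    by_cases h1 : pvInb H W d = true ∧ d ∉ seen
    · have hstrict := pvUnseen_strict H W h1.1 h1.2
      by_cases h2 : pvAt g d ≠ bg
      · have hm : pvMark g H W bg (seen, q) d = (d :: seen, q ++ [d]) := by
          unfold pvMark; rw [if_pos h1, if_pos h2]
        rw [hm]
        obtain ⟨i1, i2, _⟩ := ih (d :: seen) (q ++ [d])
        exact ⟨fun x hx => i1 x (List.mem_cons_of_mem _ hx),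
               le_of_lt (lt_of_le_of_lt i2 hstrict),
               Or.inr (lt_of_le_of_lt i2 hstrict)⟩
      · have hm : pvMark g H W bg (seen, q) d = (d :: seen, q) := by
          unfold pvMark; rw [if_pos h1, if_neg h2]
        rw [hm]
        obtain ⟨i1, i2, _⟩ := ih (d :: seen) q
        exact ⟨fun x hx => i1 x (List.mem_cons_of_mem _ hx),
               le_of_lt (lt_of_le_of_lt i2 hstrict),
               Or.inr (lt_of_le_of_lt i2 hstrict)⟩
    · have hm : pvMark g H W bg (seen, q) d = (seen, q) := by
        unfold pvMark; rw [if_neg h1]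
      rw [hm]
      exact ih seen q

-- A's BFS loop ('while q: …'), queue popped at the front, neighbours in A's order
def pvBfs (g : List (List Int)) (H W bg : Int)
    (seen q comp : List (Int × Int)) : List (Int × Int) × List (Int × Int) :=
  match q with
  | [] => (seen, comp)
  | p :: q' =>
    let st := (pvDirs.map (fun d => (p.1 + d.1, p.2 + d.2))).foldl (pvMark g H W bg) (seen, q')
    pvBfs g H W bg st.1 st.2 (comp ++ [p])
termination_by (pvUnseen H W seen, q.length)
decreasing_by
  rcases (pvMarkFold_measure g H W bg (pvDirs.map (fun d => (p.1 + d.1, p.2 + d.2))) seen q').2.2 with heq | hlt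
  · rw [heq]
    exact Prod.Lex.right _ (by simp)
  · exact Prod.Lex.left _ _ hlt

-- one outer-loop cell of connected_components
def pvCompStep (g : List (List Int)) (H W bg : Int)
    (st : List (Int × Int) × List (List (Int × Int))) (p : Int × Int) :
    List (Int × Int) × List (List (Int × Int)) :=
  if p ∈ st.1 then st
  else if pvAt g p = bg then (p :: st.1, st.2)
  else
    let r := pvBfs g H W bg (p :: st.1) [p] []
    (r.1, st.2 ++ [r.2])

def pvComponents (g : List (List Int)) (bg : Int) : List (List (Int × Int)) :=
  if g = [] ∨ g.headD [] = [] then []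
  else ((pvAllCells (g.length : Int) ((g.headD []).length : Int)).foldl
          (pvCompStep g (g.length : Int) ((g.headD []).length : Int) bg) ([], [])).2

-- Counter(cells).most_common(1)[0][0] (first key of maximal count) if nonempty else 0
def pvPick (items : List (Int × Int)) : Int :=
  match items with
  | [] => 0
  | kv :: rest => (rest.foldl (fun b kv => if kv.2 > b.2 then kv else b) kv).1

def pvModeColor (g : List (List Int)) : Int :=
  pvPick (PySem.Dict.counter g.flatten).items

def pvCropToBbox (g : List (List Int)) (cells : List (Int × Int)) : List (List Int) :=
  if cells = [] then [[]]
  else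
    -- rs = row indices, cs = column indices; r0/r1/c0/c1 = min/max of each (Python's min/max)
    (PySem.List.slice g (some ((PySem.List.min? (cells.map Prod.fst) (fun v => v)).getD 0))
        (some ((PySem.List.max? (cells.map Prod.fst) (fun v => v)).getD 0 + 1))).map
      (fun row => PySem.List.slice row (some ((PySem.List.min? (cells.map Prod.snd) (fun v => v)).getD 0))
        (some ((PySem.List.max? (cells.map Prod.snd) (fun v => v)).getD 0 + 1)))

-- the centering epilogue, identical lines in A and in B (Source B keeps them verbatim)
def pvCenter (bg th tw : Int) (cropped : List (List Int)) (ch cw : Int) : List (List Int) :=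
  let canvas := List.replicate th.toNat (List.replicate tw.toNat bg)
  let top := max 0 (PySem.Int.floordiv (th - ch) 2)
  let left := max 0 (PySem.Int.floordiv (tw - cw) 2)
  (PySem.List.pyRange 0 (min ch th) 1).foldl (fun cv r =>
    (PySem.List.pyRange 0 (min cw tw) 1).foldl (fun cv c =>
      PySem.List.pySetD cv (top + r)
        (PySem.List.pySetD (PySem.List.pyGetD cv (top + r) []) (left + c) (pvAt cropped (r, c)))) cv) canvas

def tight_crop_uncrop (grid : List (List Int)) (target_shape : Int × Int) : List (List Int) :=
  if grid = [] ∨ grid.headD [] = [] then grid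
  else if target_shape.1 ≤ 0 ∨ target_shape.2 ≤ 0 then grid
  else
    let th := target_shape.1
    let tw := target_shape.2
    let bg := pvModeColor grid
    let comps := pvComponents grid bg
    if comps = [] then grid
    else
      let cropped := pvCropToBbox grid comps.flatten
      let ch : Int := cropped.length
      let cw : Int := (cropped.headD []).length
      if ch = th ∧ cw = tw then cropped
      else pvCenter bg th tw cropped ch cw

-- ===== PORT B =====
-- Source B's dict-counting loop and max(counts.items(), key=count)[0]
def pvPickAlt (items : List (Int × Int)) : Int :=
  match items with
  | [] => 0
  | kv :: rest => (rest.foldl (fun b kv => if kv.2 > b.2 then kv else b) kv).1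

def pvModeAlt (g : List (List Int)) : Int :=
  pvPickAlt (g.foldl (fun d row => row.foldl (fun d v => d.insert v (d.getD v 0 + 1)) d) PySem.Dict.empty).items

-- Source B's single-cell bbox update ('if row[c] != bg: …')
def pvBboxStep (g : List (List Int)) (bg : Int)
    (st : Option (Int × Int × Int × Int)) (p : Int × Int) : Option (Int × Int × Int × Int) :=
  if pvAt g p ≠ bg then
    some (match st with
          | none => (p.1, p.1, p.2, p.2)
          | some (a, b, x, y) => (min a p.1, max b p.1, min x p.2, max y p.2))
  else st

def tight_crop_uncrop_alt (grid : List (List Int)) (target_shape : Int × Int) : List (List Int) :=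
  if grid = [] ∨ grid.headD [] = [] then grid
  else if target_shape.1 ≤ 0 ∨ target_shape.2 ≤ 0 then grid
  else
    let th := target_shape.1
    let tw := target_shape.2
    let bg := pvModeAlt grid
    let H : Int := grid.length
    let W : Int := (grid.headD []).length
    match (PySem.List.pyRange 0 H 1).foldl (fun st r =>
            (PySem.List.pyRange 0 W 1).foldl (fun st c => pvBboxStep grid bg st (r, c)) st) none with
    | none => grid
    | some (r0, r1, c0, c1) =>
      let cropped := (PySem.List.slice grid (some r0) (some (r1+1))).map
        (fun row => PySem.List.slice row (some c0) (some (c1+1)))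
      let ch : Int := cropped.length
      let cw : Int := (cropped.headD []).length
      if ch = th ∧ cw = tw then cropped
      else pvCenter bg th tw cropped ch cw

-- ===== PRECONDITION & SPEC =====
-- Pre_ excludes exactly the inputs where Python A raises IndexError: a later row shorter than
-- the first one while the main branch runs (grid and grid[0] nonempty, both targets positive).
def Pre_tight_crop_uncrop (grid : List (List Int)) (target_shape : Int × Int) : Prop :=
  grid = [] ∨ grid.headD [] = [] ∨ target_shape.1 ≤ 0 ∨ target_shape.2 ≤ 0 ∨
    ∀ row ∈ grid, (grid.headD []).length ≤ row.length
instance (grid : List (List Int)) (target_shape : Int × Int) : Decidable (Pre_tight_crop_uncrop grid target_shape) := by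
  unfold Pre_tight_crop_uncrop; infer_instance

def pvWitness_tight_crop_uncrop : List (List Int) × (Int × Int) := ([[1, 2], [1, 1]], (3, 4))

def Spec_tight_crop_uncrop (grid : List (List Int)) (target_shape : Int × Int) (out : List (List Int)) : Prop := out = tight_crop_uncrop_alt grid target_shape
instance (grid : List (List Int)) (target_shape : Int × Int) (out : List (List Int)) : Decidable (Spec_tight_crop_uncrop grid target_shape out) := by unfold Spec_tight_crop_uncrop; infer_instance

-- ===== CLAIM (what is proved, stated in full; the proofs are below) =====
def Claim_equal_tight_crop_uncrop : Prop := ∀ (grid : List (List Int)) (target_shape : Int × Int), Dom_tight_crop_uncrop grid target_shape → Pre_tight_crop_uncrop grid target_shape → Spec_tight_crop_uncrop grid target_shape (tight_crop_uncrop grid target_shape)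

-- ===== LEMMAS AND PROOFS =====


-- helpers for stating extrema of nonempty Int lists (proof side only)
def minI : List Int → Int
  | [] => 0
  | x :: t => t.foldl min x
def maxI : List Int → Int
  | [] => 0
  | x :: t => t.foldl max x

theorem minI_mem {l : List Int} (h : l ≠ []) : minI l ∈ l := by
  match l with
  | x :: t =>
    show t.foldl min x ∈ x :: t
    rcases PySem.List.foldl_min_mem t x with h1 | h1
    · rw [h1]; exact List.mem_cons_self
    · exact List.mem_cons_of_mem _ h1

theorem maxI_mem {l : List Int} (h : l ≠ []) : maxI l ∈ l := by
  match l with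
  | x :: t =>
    show t.foldl max x ∈ x :: t
    rcases PySem.List.foldl_max_mem t x with h1 | h1
    · rw [h1]; exact List.mem_cons_self
    · exact List.mem_cons_of_mem _ h1

theorem minI_le {l : List Int} {y : Int} (hy : y ∈ l) : minI l ≤ y := by
  match l with
  | x :: t =>
    show t.foldl min x ≤ y
    rcases List.mem_cons.mp hy with rfl | h1
    · exact (PySem.List.foldl_min_le t y).1
    · exact (PySem.List.foldl_min_le t x).2 y h1

theorem le_maxI {l : List Int} {y : Int} (hy : y ∈ l) : y ≤ maxI l := by
  match l with
  | x :: t =>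
    show y ≤ t.foldl max x
    rcases List.mem_cons.mp hy with rfl | h1
    · exact (PySem.List.le_foldl_max t y).1
    · exact (PySem.List.le_foldl_max t x).2 y h1

theorem minI_eq_of_memeq {l1 l2 : List Int} (h1 : l1 ≠ []) (h2 : l2 ≠ [])
    (h : ∀ x, x ∈ l1 ↔ x ∈ l2) : minI l1 = minI l2 :=
  le_antisymm (minI_le ((h _).mpr (minI_mem h2))) (minI_le ((h _).mp (minI_mem h1)))

theorem maxI_eq_of_memeq {l1 l2 : List Int} (h1 : l1 ≠ []) (h2 : l2 ≠ [])
    (h : ∀ x, x ∈ l1 ↔ x ∈ l2) : maxI l1 = maxI l2 :=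
  le_antisymm (le_maxI ((h _).mp (maxI_mem h1))) (le_maxI ((h _).mpr (maxI_mem h2)))

theorem minI_append_singleton (l : List Int) (x : Int) (h : l ≠ []) :
    minI (l ++ [x]) = min (minI l) x := by
  match l with
  | y :: t =>
    show (t ++ [x]).foldl min y = min (t.foldl min y) x
    rw [List.foldl_append]; rfl

theorem maxI_append_singleton (l : List Int) (x : Int) (h : l ≠ []) :
    maxI (l ++ [x]) = max (maxI l) x := by
  match l with
  | y :: t =>
    show (t ++ [x]).foldl max y = max (t.foldl max y) x
    rw [List.foldl_append]; rfl

-- membership behaviour of one neighbour-marking pass of A's BFS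
theorem pvMarkFold_mem (g : List (List Int)) (H W bg : Int) (ds : List (Int × Int)) :
    ∀ seen q : List (Int × Int), (∀ x ∈ q, x ∈ seen) →
    (∀ x ∈ seen, x ∈ (ds.foldl (pvMark g H W bg) (seen, q)).1) ∧
    (∀ x ∈ (ds.foldl (pvMark g H W bg) (seen, q)).1, x ∈ seen ∨ pvInb H W x = true) ∧
    (∀ x ∈ (ds.foldl (pvMark g H W bg) (seen, q)).2, x ∈ q ∨ (pvInb H W x = true ∧ pvAt g x ≠ bg)) ∧
    (∀ x ∈ q, x ∈ (ds.foldl (pvMark g H W bg) (seen, q)).2) ∧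
    (∀ x ∈ (ds.foldl (pvMark g H W bg) (seen, q)).1, pvAt g x ≠ bg → x ∈ seen ∨ x ∈ (ds.foldl (pvMark g H W bg) (seen, q)).2) ∧
    (∀ x ∈ (ds.foldl (pvMark g H W bg) (seen, q)).2, x ∈ (ds.foldl (pvMark g H W bg) (seen, q)).1) := by
  induction ds with
  | nil =>
    intro seen q hq
    exact ⟨fun x h => h, fun x h => Or.inl h, fun x h => Or.inl h, fun x h => h,
           fun x h _ => Or.inl h, fun x h => hq x h⟩
  | cons d ds ih =>
    intro seen q hq
    simp only [List.foldl_cons]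
    by_cases h1 : pvInb H W d = true ∧ d ∉ seen
    · by_cases h2 : pvAt g d ≠ bg
      · have hm : pvMark g H W bg (seen, q) d = (d :: seen, q ++ [d]) := by
          unfold pvMark; rw [if_pos h1, if_pos h2]
        rw [hm]
        obtain ⟨i1, i2, i3, i4, i5, i6⟩ := ih (d :: seen) (q ++ [d]) (by
          intro x hx
          rcases List.mem_append.mp hx with hx | hx
          · exact List.mem_cons_of_mem _ (hq x hx)
          · simp only [List.mem_singleton] at hx; subst hx; exact List.mem_cons_self)
        refine ⟨fun x hx => i1 x (List.mem_cons_of_mem _ hx), ?_, ?_, ?_, ?_, i6⟩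
        · intro x hx
          rcases i2 x hx with hx' | hx'
          · rcases List.mem_cons.mp hx' with rfl | hx'' 
            · exact Or.inr h1.1
            · exact Or.inl hx''
          · exact Or.inr hx'
        · intro x hx
          rcases i3 x hx with hx' | hx'
          · rcases List.mem_append.mp hx' with hx'' | hx''
            · exact Or.inl hx''
            · simp only [List.mem_singleton] at hx''; subst hx''; exact Or.inr ⟨h1.1, h2⟩
          · exact Or.inr hx'
        · exact fun x hx => i4 x (List.mem_append.mpr (Or.inl hx))
        · intro x hx hbg
          rcases i5 x hx hbg with hx' | hx'
          · rcases List.mem_cons.mp hx' with rfl | hx''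
            · exact Or.inr (i4 x (List.mem_append.mpr (Or.inr List.mem_cons_self)))
            · exact Or.inl hx''
          · exact Or.inr hx'
      · have hm : pvMark g H W bg (seen, q) d = (d :: seen, q) := by
          unfold pvMark; rw [if_pos h1, if_neg h2]
        rw [hm]
        rw [not_ne_iff] at h2
        obtain ⟨i1, i2, i3, i4, i5, i6⟩ := ih (d :: seen) q
          (fun x hx => List.mem_cons_of_mem _ (hq x hx))
        refine ⟨fun x hx => i1 x (List.mem_cons_of_mem _ hx), ?_, i3, i4, ?_, i6⟩
        · intro x hx
          rcases i2 x hx with hx' | hx'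
          · rcases List.mem_cons.mp hx' with rfl | hx''
            · exact Or.inr h1.1
            · exact Or.inl hx''
          · exact Or.inr hx'
        · intro x hx hbg
          rcases i5 x hx hbg with hx' | hx'
          · rcases List.mem_cons.mp hx' with rfl | hx''
            · exact absurd h2 hbg
            · exact Or.inl hx''
          · exact Or.inr hx'
    · have hm : pvMark g H W bg (seen, q) d = (seen, q) := by
        unfold pvMark; rw [if_neg h1]
      rw [hm]
      exact ih seen q hq


-- full behaviour of A's BFS: seen only grows inside the grid, every newly seen non-background
-- cell lands in the produced component, and the component holds only seen non-background cells
theorem pvBfs_spec (g : List (List Int)) (H W bg : Int) (P : List (Int × Int)) :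
    ∀ seen q comp : List (Int × Int),
    (∀ x ∈ q, pvInb H W x = true ∧ pvAt g x ≠ bg ∧ x ∈ seen) →
    (∀ x ∈ seen, pvInb H W x = true) →
    (∀ x ∈ seen, pvAt g x ≠ bg → x ∈ P ∨ x ∈ comp ∨ x ∈ q) →
    (∀ x ∈ comp, x ∈ seen ∧ pvInb H W x = true ∧ pvAt g x ≠ bg) →
    (∀ x ∈ seen, x ∈ (pvBfs g H W bg seen q comp).1) ∧
    (∀ x ∈ (pvBfs g H W bg seen q comp).1, pvInb H W x = true) ∧
    (∀ x ∈ (pvBfs g H W bg seen q comp).1, pvAt g x ≠ bg → x ∈ P ∨ x ∈ (pvBfs g H W bg seen q comp).2) ∧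
    (∀ x ∈ (pvBfs g H W bg seen q comp).2, x ∈ (pvBfs g H W bg seen q comp).1 ∧ pvInb H W x = true ∧ pvAt g x ≠ bg) := by
  intro seen q comp
  induction seen, q, comp using pvBfs.induct g H W bg with
  | case1 seen comp =>
    intro hq hseen hacc hcomp
    rw [pvBfs]
    refine ⟨fun x h => h, hseen, ?_, fun x hx => ⟨(hcomp x hx).1, (hcomp x hx).2⟩⟩
    intro x hx hbg
    rcases hacc x hx hbg with h | h | h
    · exact Or.inl h
    · exact Or.inr h
    · exact absurd h (List.not_mem_nil)
  | case2 seen comp p q' st ih =>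
    intro hq hseen hacc hcomp
    rw [pvBfs]
    obtain ⟨m1, m2, m3, m4, m5, m6⟩ := pvMarkFold_mem g H W bg
      (pvDirs.map (fun d => (p.1 + d.1, p.2 + d.2))) seen q'
      (fun x hx => (hq x (List.mem_cons_of_mem _ hx)).2.2)
    have hp := hq p List.mem_cons_self
    obtain ⟨r1, r2, r3, r4⟩ := ih
      (by
        intro x hx
        rcases m3 x hx with hx' | hx'
        · have := hq x (List.mem_cons_of_mem _ hx')
          exact ⟨this.1, this.2.1, m1 x this.2.2⟩
        · exact ⟨hx'.1, hx'.2, m6 x hx⟩)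
      (by
        intro x hx
        rcases m2 x hx with hx' | hx'
        · exact hseen x hx'
        · exact hx')
      (by
        intro x hx hbg
        rcases m5 x hx hbg with hx' | hx'
        · rcases hacc x hx' hbg with h | h | h
          · exact Or.inl h
          · exact Or.inr (Or.inl (List.mem_append.mpr (Or.inl h)))
          · rcases List.mem_cons.mp h with rfl | h'
            · exact Or.inr (Or.inl (List.mem_append.mpr (Or.inr List.mem_cons_self)))
            · exact Or.inr (Or.inr (m4 x h'))
        · exact Or.inr (Or.inr hx'))
      (by
        intro x hx
        rcases List.mem_append.mp hx with hx' | hx'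
        · have := hcomp x hx'
          exact ⟨m1 x this.1, this.2⟩
        · simp only [List.mem_singleton] at hx'; subst hx'
          exact ⟨m1 x hp.2.2, hp.1, hp.2.1⟩)
    exact ⟨fun x hx => r1 x (m1 x hx), r2, r3, r4⟩


-- outer-loop invariant of connected_components
theorem pvCompFold_spec (g : List (List Int)) (H W bg : Int) :
    ∀ (l : List (Int × Int)), (∀ p ∈ l, pvInb H W p = true) →
    ∀ st : List (Int × Int) × List (List (Int × Int)),
    (∀ x ∈ st.1, pvInb H W x = true) →
    (∀ x ∈ st.1, pvAt g x ≠ bg → x ∈ st.2.flatten) →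
    (∀ x ∈ st.2.flatten, x ∈ st.1 ∧ pvInb H W x = true ∧ pvAt g x ≠ bg) →
    (∀ c ∈ st.2, c ≠ []) →
    (∀ x ∈ st.1, x ∈ (l.foldl (pvCompStep g H W bg) st).1) ∧
    (∀ p ∈ l, p ∈ (l.foldl (pvCompStep g H W bg) st).1) ∧
    (∀ x ∈ (l.foldl (pvCompStep g H W bg) st).1, pvAt g x ≠ bg → x ∈ (l.foldl (pvCompStep g H W bg) st).2.flatten) ∧
    (∀ x ∈ (l.foldl (pvCompStep g H W bg) st).2.flatten, x ∈ (l.foldl (pvCompStep g H W bg) st).1 ∧ pvInb H W x = true ∧ pvAt g x ≠ bg) ∧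
    (∀ c ∈ (l.foldl (pvCompStep g H W bg) st).2, c ≠ []) := by
  intro l
  induction l with
  | nil =>
    intro _ st h1 h2 h3 h4
    exact ⟨fun x h => h, fun p h => absurd h List.not_mem_nil, h2, h3, h4⟩
  | cons p l ih =>
    intro hl st h1 h2 h3 h4
    have hp := hl p List.mem_cons_self
    simp only [List.foldl_cons]
    by_cases hseen : p ∈ st.1
    · have hm : pvCompStep g H W bg st p = st := by unfold pvCompStep; rw [if_pos hseen]
      rw [hm]
      obtain ⟨i0, i1, i2, i3, i4⟩ := ih (fun x hx => hl x (List.mem_cons_of_mem _ hx)) st h1 h2 h3 h4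
      exact ⟨i0, fun x hx => (List.mem_cons.mp hx).elim (fun he => he ▸ i0 p hseen) (i1 x), i2, i3, i4⟩
    · by_cases hbg : pvAt g p = bg
      · have hm : pvCompStep g H W bg st p = (p :: st.1, st.2) := by
          unfold pvCompStep; rw [if_neg hseen, if_pos hbg]
        rw [hm]
        obtain ⟨i0, i1, i2, i3, i4⟩ := ih (fun x hx => hl x (List.mem_cons_of_mem _ hx)) (p :: st.1, st.2)
          (by intro x hx; rcases List.mem_cons.mp hx with rfl | hx'
              · exact hp
              · exact h1 x hx')
          (by intro x hx hb; rcases List.mem_cons.mp hx with rfl | hx'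
              · exact absurd hbg hb
              · exact h2 x hx' hb)
          (by intro x hx
              obtain ⟨ha, hb, hc⟩ := h3 x hx
              exact ⟨List.mem_cons_of_mem _ ha, hb, hc⟩)
          h4
        exact ⟨fun x hx => i0 x (List.mem_cons_of_mem _ hx),
               fun x hx => (List.mem_cons.mp hx).elim (fun he => he ▸ i0 p List.mem_cons_self) (i1 x),
               i2, i3, i4⟩
      · have hm : pvCompStep g H W bg st p =
            ((pvBfs g H W bg (p :: st.1) [p] []).1, st.2 ++ [(pvBfs g H W bg (p :: st.1) [p] []).2]) := by
          unfold pvCompStep; rw [if_neg hseen, if_neg hbg]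
        rw [hm]
        obtain ⟨b1, b2, b3, b4⟩ := pvBfs_spec g H W bg st.2.flatten (p :: st.1) [p] []
          (by intro x hx; simp only [List.mem_singleton] at hx; subst hx
              exact ⟨hp, hbg, List.mem_cons_self⟩)
          (by intro x hx; rcases List.mem_cons.mp hx with rfl | hx'
              · exact hp
              · exact h1 x hx')
          (by intro x hx hb; rcases List.mem_cons.mp hx with rfl | hx'
              · exact Or.inr (Or.inr List.mem_cons_self)
              · exact Or.inl (h2 x hx' hb))
          (fun x hx => absurd hx List.not_mem_nil)
        have hflat : ∀ x, x ∈ (st.2 ++ [(pvBfs g H W bg (p :: st.1) [p] []).2]).flatten ↔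
            x ∈ st.2.flatten ∨ x ∈ (pvBfs g H W bg (p :: st.1) [p] []).2 := by
          intro x
          simp only [List.flatten_append, List.flatten_cons, List.flatten_nil, List.append_nil,
            List.mem_append]
        have hpB : p ∈ (pvBfs g H W bg (p :: st.1) [p] []).2 := by
          rcases b3 p (b1 p List.mem_cons_self) hbg with h' | h'
          · exact absurd (h3 p h').1 hseen
          · exact h'
        obtain ⟨i0, i1, i2, i3, i4⟩ := ih (fun x hx => hl x (List.mem_cons_of_mem _ hx))
          ((pvBfs g H W bg (p :: st.1) [p] []).1, st.2 ++ [(pvBfs g H W bg (p :: st.1) [p] []).2])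
          b2
          (by intro x hx hb
              rcases b3 x hx hb with h' | h'
              · exact (hflat x).mpr (Or.inl h')
              · exact (hflat x).mpr (Or.inr h'))
          (by intro x hx
              rcases (hflat x).mp hx with h' | h'
              · obtain ⟨ha, hb, hc⟩ := h3 x h'
                exact ⟨b1 x (List.mem_cons_of_mem _ ha), hb, hc⟩
              · exact b4 x h')
          (by intro c hc
              rcases List.mem_append.mp hc with h' | h'
              · exact h4 c h'
              · simp only [List.mem_singleton] at h'; subst h'
                exact List.ne_nil_of_mem hpB)
        exact ⟨fun x hx => i0 x (b1 x (List.mem_cons_of_mem _ hx)),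
               fun x hx => (List.mem_cons.mp hx).elim
                 (fun he => he ▸ i0 p (b1 p List.mem_cons_self)) (i1 x),
               i2, i3, i4⟩

theorem mem_pvAllCells (H W : Int) (x : Int × Int) :
    x ∈ pvAllCells H W ↔ pvInb H W x = true := by
  unfold pvAllCells pvInb
  simp only [List.mem_flatMap, List.mem_map, PySem.List.mem_pyRange_one, decide_eq_true_eq]
  constructor
  · rintro ⟨r, hr, c, hc, rfl⟩; exact ⟨hr.1, hr.2, hc.1, hc.2⟩
  · rintro ⟨h1, h2, h3, h4⟩; exact ⟨x.1, ⟨h1, h2⟩, x.2, ⟨h3, h4⟩, rfl⟩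

-- what A's connected_components computes: its cells are exactly the non-background grid cells
theorem pvComponents_char (g : List (List Int)) (bg : Int) (hg : ¬(g = [] ∨ g.headD [] = [])) :
    (∀ x, x ∈ (pvComponents g bg).flatten ↔
      x ∈ pvAllCells (g.length : Int) ((g.headD []).length : Int) ∧ pvAt g x ≠ bg) ∧
    (∀ c ∈ pvComponents g bg, c ≠ []) := by
  have hunf : pvComponents g bg = ((pvAllCells (g.length : Int) ((g.headD []).length : Int)).foldl
      (pvCompStep g (g.length : Int) ((g.headD []).length : Int) bg) ([], [])).2 := by
    unfold pvComponents; rw [if_neg hg]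
  obtain ⟨i0, i1, i2, i3, i4⟩ := pvCompFold_spec g (g.length : Int) ((g.headD []).length : Int) bg
    (pvAllCells (g.length : Int) ((g.headD []).length : Int))
    (fun p hp => (mem_pvAllCells _ _ p).mp hp)
    ([], [])
    (fun x hx => absurd hx List.not_mem_nil)
    (fun x hx => absurd hx List.not_mem_nil)
    (by intro x hx; simp at hx)
    (by intro c hc; simp at hc)
  rw [hunf]
  refine ⟨?_, i4⟩
  intro x
  constructor
  · intro hx
    obtain ⟨_, hb, hc⟩ := i3 x hx
    exact ⟨(mem_pvAllCells _ _ x).mpr hb, hc⟩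
  · intro ⟨ha, hb⟩
    exact i2 x (i1 x ha) hb


-- Source B's running min/max scan, characterised against the filtered cell list
theorem pvBboxFold_some (g : List (List Int)) (bg : Int) (l : List (Int × Int)) :
    ∀ (F0 : List (Int × Int)), F0 ≠ [] →
    l.foldl (pvBboxStep g bg)
      (some (minI (F0.map Prod.fst), maxI (F0.map Prod.fst), minI (F0.map Prod.snd), maxI (F0.map Prod.snd)))
    = some (minI ((F0 ++ l.filter (fun p => decide (pvAt g p ≠ bg))).map Prod.fst),
            maxI ((F0 ++ l.filter (fun p => decide (pvAt g p ≠ bg))).map Prod.fst),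
            minI ((F0 ++ l.filter (fun p => decide (pvAt g p ≠ bg))).map Prod.snd),
            maxI ((F0 ++ l.filter (fun p => decide (pvAt g p ≠ bg))).map Prod.snd)) := by
  induction l with
  | nil => intro F0 h; simp
  | cons p l ih =>
    intro F0 hF0
    simp only [List.foldl_cons, List.filter_cons]
    by_cases hbg : pvAt g p ≠ bg
    · have hm : pvBboxStep g bg
          (some (minI (F0.map Prod.fst), maxI (F0.map Prod.fst), minI (F0.map Prod.snd), maxI (F0.map Prod.snd))) p
          = some (min (minI (F0.map Prod.fst)) p.1, max (maxI (F0.map Prod.fst)) p.1,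
                  min (minI (F0.map Prod.snd)) p.2, max (maxI (F0.map Prod.snd)) p.2) := by
        unfold pvBboxStep; rw [if_pos hbg]
      have hmap : F0.map Prod.fst ≠ [] := by
        intro h; exact hF0 (List.map_eq_nil_iff.mp h)
      have hmap2 : F0.map Prod.snd ≠ [] := by
        intro h; exact hF0 (List.map_eq_nil_iff.mp h)
      rw [hm, decide_eq_true hbg]
      have e1 : min (minI (F0.map Prod.fst)) p.1 = minI ((F0 ++ [p]).map Prod.fst) := by
        simp only [List.map_append, List.map_cons, List.map_nil]
        rw [minI_append_singleton _ _ hmap]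
      have e2 : max (maxI (F0.map Prod.fst)) p.1 = maxI ((F0 ++ [p]).map Prod.fst) := by
        simp only [List.map_append, List.map_cons, List.map_nil]
        rw [maxI_append_singleton _ _ hmap]
      have e3 : min (minI (F0.map Prod.snd)) p.2 = minI ((F0 ++ [p]).map Prod.snd) := by
        simp only [List.map_append, List.map_cons, List.map_nil]
        rw [minI_append_singleton _ _ hmap2]
      have e4 : max (maxI (F0.map Prod.snd)) p.2 = maxI ((F0 ++ [p]).map Prod.snd) := by
        simp only [List.map_append, List.map_cons, List.map_nil]
        rw [maxI_append_singleton _ _ hmap2]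
      rw [e1, e2, e3, e4, ih (F0 ++ [p]) (by simp)]
      simp [List.append_assoc]
    · have hm : pvBboxStep g bg
          (some (minI (F0.map Prod.fst), maxI (F0.map Prod.fst), minI (F0.map Prod.snd), maxI (F0.map Prod.snd))) p
          = some (minI (F0.map Prod.fst), maxI (F0.map Prod.fst), minI (F0.map Prod.snd), maxI (F0.map Prod.snd)) := by
        unfold pvBboxStep; rw [if_neg hbg]
      rw [hm, decide_eq_false hbg]
      exact ih F0 hF0


theorem pvBboxFold_none (g : List (List Int)) (bg : Int) (l : List (Int × Int)) :
    l.foldl (pvBboxStep g bg) none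
    = if l.filter (fun p => decide (pvAt g p ≠ bg)) = [] then none
      else some (minI ((l.filter (fun p => decide (pvAt g p ≠ bg))).map Prod.fst),
                 maxI ((l.filter (fun p => decide (pvAt g p ≠ bg))).map Prod.fst),
                 minI ((l.filter (fun p => decide (pvAt g p ≠ bg))).map Prod.snd),
                 maxI ((l.filter (fun p => decide (pvAt g p ≠ bg))).map Prod.snd)) := by
  induction l with
  | nil => simp
  | cons p l ih =>
    simp only [List.foldl_cons, List.filter_cons]
    by_cases hbg : pvAt g p ≠ bg
    · have hm : pvBboxStep g bg none p = some (p.1, p.1, p.2, p.2) := by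
        unfold pvBboxStep; rw [if_pos hbg]
      rw [hm, decide_eq_true hbg]
      have h0 : (p.1, p.1, p.2, p.2) =
          (minI ([p].map Prod.fst), maxI ([p].map Prod.fst), minI ([p].map Prod.snd), maxI ([p].map Prod.snd)) := rfl
      rw [h0, pvBboxFold_some g bg l [p] (by simp)]
      rw [if_neg (by simp)]
      rfl
    · have hm : pvBboxStep g bg none p = none := by
        unfold pvBboxStep; rw [if_neg hbg]
      rw [hm, decide_eq_false hbg, ih]
      simp


-- Source B's nested index loops are the row-major fold over all cells
theorem pvNested_eq_flat (g : List (List Int)) (bg : Int) (H W : Int) :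
    ((PySem.List.pyRange 0 H 1).foldl (fun st r =>
        (PySem.List.pyRange 0 W 1).foldl (fun st c => pvBboxStep g bg st (r, c)) st) none)
    = (pvAllCells H W).foldl (pvBboxStep g bg) none := by
  unfold pvAllCells
  rw [List.flatMap_def, List.foldl_flatten, List.foldl_map]
  apply PySem.List.foldl_congr_mem
  intro acc r _
  rw [List.foldl_map]


-- the two colour-counting loops agree (Counter over the flattened grid vs nested dict loop)
theorem pvMode_eq (g : List (List Int)) : pvModeAlt g = pvModeColor g := by
  have hc : g.foldl (fun d row => row.foldl (fun d v => d.insert v (d.getD v 0 + 1)) d) PySem.Dict.empty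
      = PySem.Dict.counter g.flatten := by
    rw [← PySem.Dict.foldl_insert_getD_add_one_eq_counter, List.foldl_flatten]
  unfold pvModeAlt pvModeColor
  have hp : ∀ l : List (Int × Int), pvPickAlt l = pvPick l := by
    intro l; cases l <;> rfl
  rw [hp]
  exact congrArg (fun d : PySem.Dict Int Int => pvPick d.items) hc


theorem min?_getD_eq_minI (l : List Int) (h : l ≠ []) :
    (PySem.List.min? l (fun v => v)).getD 0 = minI l := by
  match l with
  | x :: t => rw [PySem.List.min?_id_cons]; rfl

theorem max?_getD_eq_maxI (l : List Int) (h : l ≠ []) :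
    (PySem.List.max? l (fun v => v)).getD 0 = maxI l := by
  match l with
  | x :: t => rw [PySem.List.max?_id_cons]; rfl

-- ===== VERDICT (by name: the statement is the Claim_ definition above) =====
theorem tight_crop_uncrop_spec : Claim_equal_tight_crop_uncrop := by
  intro grid ts _ hpre
  unfold Spec_tight_crop_uncrop
  rw [tight_crop_uncrop.eq_def, tight_crop_uncrop_alt.eq_def]
  by_cases h1 : grid = [] ∨ grid.headD [] = []
  · rw [if_pos h1, if_pos h1]
  rw [if_neg h1, if_neg h1]
  by_cases h2 : ts.1 ≤ 0 ∨ ts.2 ≤ 0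
  · rw [if_pos h2, if_pos h2]
  rw [if_neg h2, if_neg h2]
  simp only [pvMode_eq, pvNested_eq_flat, pvBboxFold_none]
  obtain ⟨hchar, hnon⟩ := pvComponents_char grid (pvModeColor grid) h1
  have hmemF : ∀ x, x ∈ (pvComponents grid (pvModeColor grid)).flatten ↔
      x ∈ (pvAllCells (grid.length : Int) ((grid.headD []).length : Int)).filter
            (fun p => decide (pvAt grid p ≠ pvModeColor grid)) := by
    intro x
    rw [hchar x, List.mem_filter]
    simp
  by_cases h3 : pvComponents grid (pvModeColor grid) = []
  · have hF : (pvAllCells (grid.length : Int) ((grid.headD []).length : Int)).filter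
        (fun p => decide (pvAt grid p ≠ pvModeColor grid)) = [] := by
      rw [List.eq_nil_iff_forall_not_mem]
      intro x hx
      have hx' := (hmemF x).mpr hx
      rw [h3] at hx'
      simp at hx'
    rw [if_pos h3, if_pos hF]
  · have hflatne : (pvComponents grid (pvModeColor grid)).flatten ≠ [] := by
      obtain ⟨c, cs, hcc⟩ := List.exists_cons_of_ne_nil h3
      have hc := hnon c (by rw [hcc]; exact List.mem_cons_self)
      obtain ⟨x, hx⟩ := List.exists_mem_of_ne_nil c hc
      exact List.ne_nil_of_mem (List.mem_flatten.mpr ⟨c, by rw [hcc]; exact List.mem_cons_self, hx⟩)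
    have hFne : (pvAllCells (grid.length : Int) ((grid.headD []).length : Int)).filter
        (fun p => decide (pvAt grid p ≠ pvModeColor grid)) ≠ [] := by
      obtain ⟨x, hx⟩ := List.exists_mem_of_ne_nil _ hflatne
      exact List.ne_nil_of_mem ((hmemF x).mp hx)
    have hmapsfst : ∀ v, v ∈ (pvComponents grid (pvModeColor grid)).flatten.map Prod.fst ↔
        v ∈ ((pvAllCells (grid.length : Int) ((grid.headD []).length : Int)).filter
              (fun p => decide (pvAt grid p ≠ pvModeColor grid))).map Prod.fst := by
      intro v
      simp only [List.mem_map]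
      exact ⟨fun ⟨a, ha, he⟩ => ⟨a, (hmemF a).mp ha, he⟩, fun ⟨a, ha, he⟩ => ⟨a, (hmemF a).mpr ha, he⟩⟩
    have hmapssnd : ∀ v, v ∈ (pvComponents grid (pvModeColor grid)).flatten.map Prod.snd ↔
        v ∈ ((pvAllCells (grid.length : Int) ((grid.headD []).length : Int)).filter
              (fun p => decide (pvAt grid p ≠ pvModeColor grid))).map Prod.snd := by
      intro v
      simp only [List.mem_map]
      exact ⟨fun ⟨a, ha, he⟩ => ⟨a, (hmemF a).mp ha, he⟩, fun ⟨a, ha, he⟩ => ⟨a, (hmemF a).mpr ha, he⟩⟩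
    have hmne1 : (pvComponents grid (pvModeColor grid)).flatten.map Prod.fst ≠ [] := by
      intro h; exact hflatne (List.map_eq_nil_iff.mp h)
    have hmne2 : (pvComponents grid (pvModeColor grid)).flatten.map Prod.snd ≠ [] := by
      intro h; exact hflatne (List.map_eq_nil_iff.mp h)
    have hFm1 : ((pvAllCells (grid.length : Int) ((grid.headD []).length : Int)).filter
        (fun p => decide (pvAt grid p ≠ pvModeColor grid))).map Prod.fst ≠ [] := by
      intro h; exact hFne (List.map_eq_nil_iff.mp h)
    have hFm2 : ((pvAllCells (grid.length : Int) ((grid.headD []).length : Int)).filter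
        (fun p => decide (pvAt grid p ≠ pvModeColor grid))).map Prod.snd ≠ [] := by
      intro h; exact hFne (List.map_eq_nil_iff.mp h)
    have hA : pvCropToBbox grid (pvComponents grid (pvModeColor grid)).flatten =
        List.map (fun row => PySem.List.slice row
            (some (minI (((pvAllCells (grid.length : Int) ((grid.headD []).length : Int)).filter
              (fun p => decide (pvAt grid p ≠ pvModeColor grid))).map Prod.snd)))
            (some (maxI (((pvAllCells (grid.length : Int) ((grid.headD []).length : Int)).filter
              (fun p => decide (pvAt grid p ≠ pvModeColor grid))).map Prod.snd) + 1)))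
          (PySem.List.slice grid
            (some (minI (((pvAllCells (grid.length : Int) ((grid.headD []).length : Int)).filter
              (fun p => decide (pvAt grid p ≠ pvModeColor grid))).map Prod.fst)))
            (some (maxI (((pvAllCells (grid.length : Int) ((grid.headD []).length : Int)).filter
              (fun p => decide (pvAt grid p ≠ pvModeColor grid))).map Prod.fst) + 1))) := by
      rw [pvCropToBbox.eq_def, if_neg hflatne]
      rw [min?_getD_eq_minI _ hmne1, max?_getD_eq_maxI _ hmne1,
          min?_getD_eq_minI _ hmne2, max?_getD_eq_maxI _ hmne2,
          minI_eq_of_memeq hmne1 hFm1 hmapsfst, maxI_eq_of_memeq hmne1 hFm1 hmapsfst,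
          minI_eq_of_memeq hmne2 hFm2 hmapssnd, maxI_eq_of_memeq hmne2 hFm2 hmapssnd]
    rw [if_neg h3, if_neg hFne, hA]
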